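-- pv_equiv track=rewrite | github.com/chelstein/eas-station | app_core/audio/fips_utils.py | determine_fips_matches
-- ===== SOURCE A (Python) =====
-- from typing import Dict, Iterable, List, Optional, Set
--
-- def _normalize_fips_code(value: Optional[str]) -> Optional[str]:
--     """Normalize a SAME location code to its six-digit numeric representation."""
--
--     if not value:
--         return None
--
--     digits = ''.join(ch for ch in str(value).strip() if ch.isdigit())
--     if not digits:
--         return None
--
--     if len(digits) > 6:
--         digits = digits[-6:]
--
--     return digits.zfill(6)
--
-- def determine_fips_matches(
--     alert_fips_codes: Iterable[str],
--     configured_fips_codes: Iterable[str],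
-- ) -> List[str]:
--     """Determine which configured FIPS codes match alert codes, honoring wildcards.
--
--     SAME/EAS FIPS codes use PSSCCC format:
--     - P: Subdivision indicator (0=entire county, 1-9=subdivision)
--     - SS: State code (00=nationwide, 01-95=specific state)
--     - CCC: County code (000=state-wide, 001-999=specific county)
--
--     Matching rules:
--     - 000000 (nationwide) matches ALL configured codes
--     - SS000 (state-wide) matches all configured codes in that state
--     - PSSCCC matches configured codes for the same county regardless of P digit
--       (e.g., alert 539137 matches configured 039137 - same county, different subdivision)
--     """
--
--     configured_map: Dict[str, str] = {}  # normalized -> original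
--     configured_states: Dict[str, Set[str]] = {}  # state code -> set of original codes
--     configured_counties: Dict[str, Set[str]] = {}  # SSCCC (without P) -> set of original codes
--
--     for code in configured_fips_codes:
--         normalized = _normalize_fips_code(code)
--         if not normalized:
--             continue
--         configured_map[normalized] = code
--         state = normalized[1:3]  # SS from PSSCCC
--         county = normalized[1:6]  # SSCCC (strip P digit for county matching)
--         configured_states.setdefault(state, set()).add(code)
--         configured_counties.setdefault(county, set()).add(code)
--
--     alert_normalized: Set[str] = set()
--     statewide_alerts: Set[str] = set()
--     matches: Set[str] = set()
--
--     for code in alert_fips_codes: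
--         normalized = _normalize_fips_code(code)
--         if not normalized:
--             continue
--         alert_normalized.add(normalized)
--         # Check for state-wide alert (ends in 000 but not nationwide)
--         if normalized.endswith('000') and normalized != '000000':
--             statewide_alerts.add(normalized[1:3])
--
--     # Check for nationwide alert (000000) - matches everything
--     if '000000' in alert_normalized:
--         matches.update(configured_map.values())
--         return sorted(matches)
--
--     # Check for state-wide alerts (SS000) - matches all counties in that state
--     for state in statewide_alerts:
--         matches.update(configured_states.get(state, set()))
--
--     # Check for county-level matches (PSSCCC)
--     # Match by SSCCC (ignoring P digit) so 539137 matches configured 039137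
--     for code in alert_normalized:
--         # Skip nationwide and state-wide codes (already handled)
--         if code == '000000' or code.endswith('000'):
--             continue
--         # Extract SSCCC (county identifier without subdivision)
--         county = code[1:6]
--         matches.update(configured_counties.get(county, set()))
--
--     return sorted(matches)
-- ===== SOURCE B (Python) =====
-- def _normalize_fips_code(value):
--     """Normalize a SAME location code to its six-digit numeric representation."""
--     if not value:
--         return None
--     digits = ''.join(ch for ch in str(value).strip() if ch.isdigit())
--     if not digits:
--         return None
--     if len(digits) > 6:
--         digits = digits[-6:]
--     return digits.zfill(6)
--
--
-- def determine_fips_matches(alert_fips_codes, configured_fips_codes):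
--     """Determine which configured FIPS codes match alert codes, honoring wildcards.
--
--     Single pass over the alerts classifying each normalized code as nationwide /
--     statewide (SS keys) / county (SSCCC keys), then one predicate scan over the
--     configured (normalized, original) pairs; nationwide keeps the dedup-by-
--     normalized dict so its value set is identical to the original's.
--     """
--     pairs = []
--     dedup = {}
--     for code in configured_fips_codes:
--         normalized = _normalize_fips_code(code)
--         if not normalized:
--             continue
--         pairs.append((normalized, code))
--         dedup[normalized] = code
--
--     nationwide = False
--     states = set()
--     counties = set()
--     for code in alert_fips_codes:
--         normalized = _normalize_fips_code(code)
--         if not normalized: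
--             continue
--         if normalized == '000000':
--             nationwide = True
--         elif normalized.endswith('000'):
--             states.add(normalized[1:3])
--         else:
--             counties.add(normalized[1:6])
--
--     if nationwide:
--         return sorted(set(dedup.values()))
--
--     out = set()
--     for normalized, code in pairs:
--         if normalized[1:3] in states or normalized[1:6] in counties:
--             out.add(code)
--     return sorted(out)
-- ===== Notes on version B (the rewrite author's own statement) =====
-- stated objective: alternative
-- what changed: Replaced A's two dicts-of-sets keyed by state and county plus set-union passes over alert-derived sets by one classifying pass over the alerts (nationwide flag, statewide SS-key set, county SSCCC-key set) and a single predicate scan over the configured (normalized, original) pairs; the nationwide case keeps the normalized->original dict so its value set matches A's exactly.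
import Mathlib
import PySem

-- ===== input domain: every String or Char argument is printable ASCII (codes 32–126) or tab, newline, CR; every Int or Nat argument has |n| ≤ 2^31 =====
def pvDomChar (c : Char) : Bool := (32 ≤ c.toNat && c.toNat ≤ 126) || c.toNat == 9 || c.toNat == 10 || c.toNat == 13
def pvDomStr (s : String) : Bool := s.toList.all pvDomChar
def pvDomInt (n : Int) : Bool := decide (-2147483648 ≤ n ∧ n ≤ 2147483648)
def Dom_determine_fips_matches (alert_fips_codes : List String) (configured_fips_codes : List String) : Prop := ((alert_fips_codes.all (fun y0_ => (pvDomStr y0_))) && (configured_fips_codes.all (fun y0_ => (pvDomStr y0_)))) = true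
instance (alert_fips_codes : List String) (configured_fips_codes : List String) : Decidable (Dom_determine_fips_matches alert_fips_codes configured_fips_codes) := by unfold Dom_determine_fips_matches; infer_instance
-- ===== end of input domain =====

-- B replaces A's per-state/per-county dicts of sets and set-union passes by one classifying
-- pass over the alerts plus a single predicate scan over (normalized, original) pairs
-- (objective: alternative, same asymptotic cost).

-- ===== PORT A =====
-- _normalize_fips_code (helper of the module; both Source A and Source B contain it verbatim).
-- per-char ch.isdigit() is PySem.Chars.isdigit, exact on the ASCII domain.
def normFips (value : String) : Option String :=
  if value = "" then none
  else
    let digits := (PySem.Chars.strip value.toList).filter PySem.Chars.isdigit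
    if digits = [] then none
    else
      let digits := if digits.length > 6 then PySem.Chars.slice digits (some (-6)) none else digits
      some (String.ofList (PySem.Chars.zfill digits 6))

-- s[a:b] on a Python str (both versions slice normalized[1:3] / normalized[1:6])
def slc (s : String) (a b : Int) : String :=
  String.ofList (PySem.Chars.slice s.toList (some a) (some b))

-- configured_map[normalized] = code
def aMapStep (d : PySem.Dict String String) (code : String) : PySem.Dict String String :=
  match normFips code with
  | none => d
  | some n => d.insert n code

-- configured_states / configured_counties: d.setdefault(k(normalized), set()).add(code)
def aGroupStep (k : String → String) (d : PySem.Dict String (PySem.Set String)) (code : String) :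
    PySem.Dict String (PySem.Set String) :=
  match normFips code with
  | none => d
  | some n => d.modify (k n) PySem.Set.empty (fun s => PySem.Set.add s code)

-- alert_normalized.add(normalized)
def aNormStep (s : PySem.Set String) (code : String) : PySem.Set String :=
  match normFips code with
  | none => s
  | some n => PySem.Set.add s n

-- if normalized.endswith('000') and normalized != '000000': statewide_alerts.add(normalized[1:3])
def aWideStep (s : PySem.Set String) (code : String) : PySem.Set String :=
  match normFips code with
  | none => s
  | some n =>
    if PySem.Str.endswith n "000" && decide (n ≠ "000000") then PySem.Set.add s (slc n 1 3) else s

def determine_fips_matches (alert_fips_codes : List String) (configured_fips_codes : List String) : List String :=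
  -- the configured loop fills three independent dicts; ported as one fold per accumulator
  let configuredMap := configured_fips_codes.foldl aMapStep PySem.Dict.empty
  let configuredStates := configured_fips_codes.foldl (aGroupStep (fun n => slc n 1 3)) PySem.Dict.empty
  let configuredCounties := configured_fips_codes.foldl (aGroupStep (fun n => slc n 1 6)) PySem.Dict.empty
  -- the alert loop fills two independent sets; ported likewise
  let alertNormalized := alert_fips_codes.foldl aNormStep PySem.Set.empty
  let statewideAlerts := alert_fips_codes.foldl aWideStep PySem.Set.empty
  if PySem.Set.contains alertNormalized "000000" then
    PySem.List.sorted (PySem.Set.update PySem.Set.empty configuredMap.values) (fun x => x) false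
  else
    -- iteration over the Python sets is consumed only into another set, then sorted: order-exact
    let m1 := statewideAlerts.foldl
      (fun m st => PySem.Set.update m (configuredStates.getD st PySem.Set.empty)) PySem.Set.empty
    let m2 := alertNormalized.foldl
      (fun m a => if a == "000000" || PySem.Str.endswith a "000" then m
                  else PySem.Set.update m (configuredCounties.getD (slc a 1 6) PySem.Set.empty)) m1
    PySem.List.sorted m2 (fun x => x) false

-- ===== PORT B =====
-- pairs.append((normalized, code))
def bPairsStep (l : List (String × String)) (code : String) : List (String × String) :=
  match normFips code with
  | none => l
  | some n => l ++ [(n, code)]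

-- dedup[normalized] = code
def bDedupStep (d : PySem.Dict String String) (code : String) : PySem.Dict String String :=
  match normFips code with
  | none => d
  | some n => d.insert n code

-- the single classifying pass over the alerts: (nationwide, states, counties)
def bAlertStep (acc : Bool × PySem.Set String × PySem.Set String) (code : String) :
    Bool × PySem.Set String × PySem.Set String :=
  match normFips code with
  | none => acc
  | some n =>
    if n == "000000" then (true, acc.2.1, acc.2.2)
    else if PySem.Str.endswith n "000" then (acc.1, PySem.Set.add acc.2.1 (slc n 1 3), acc.2.2)
    else (acc.1, acc.2.1, PySem.Set.add acc.2.2 (slc n 1 6))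

def determine_fips_matches_alt (alert_fips_codes : List String) (configured_fips_codes : List String) : List String :=
  let pairs := configured_fips_codes.foldl bPairsStep []
  let dedup := configured_fips_codes.foldl bDedupStep PySem.Dict.empty
  let acc := alert_fips_codes.foldl bAlertStep (false, PySem.Set.empty, PySem.Set.empty)
  if acc.1 then
    PySem.List.sorted (PySem.Set.ofList dedup.values) (fun x => x) false
  else
    PySem.List.sorted
      (pairs.foldl
        (fun out p =>
          if PySem.Set.contains acc.2.1 (slc p.1 1 3) || PySem.Set.contains acc.2.2 (slc p.1 1 6)
          then PySem.Set.add out p.2 else out)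
        PySem.Set.empty)
      (fun x => x) false

-- ===== PRECONDITION & SPEC =====
def Spec_determine_fips_matches (alert_fips_codes : List String) (configured_fips_codes : List String) (out : List String) : Prop := out = determine_fips_matches_alt alert_fips_codes configured_fips_codes
instance (alert_fips_codes : List String) (configured_fips_codes : List String) (out : List String) : Decidable (Spec_determine_fips_matches alert_fips_codes configured_fips_codes out) := by unfold Spec_determine_fips_matches; infer_instance

-- ===== CLAIM (what is proved, stated in full; the proofs are below) =====
def Claim_equal_determine_fips_matches : Prop := ∀ (alert_fips_codes : List String) (configured_fips_codes : List String), Dom_determine_fips_matches alert_fips_codes configured_fips_codes → Spec_determine_fips_matches alert_fips_codes configured_fips_codes (determine_fips_matches alert_fips_codes configured_fips_codes)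

-- ===== LEMMAS AND PROOFS =====

-- proof-side helpers: the three components of B's classifying pass, as separate folds
def nwStep (b : Bool) (code : String) : Bool :=
  match normFips code with
  | none => b
  | some n => if n == "000000" then true else b

def cntStep (s : PySem.Set String) (code : String) : PySem.Set String :=
  match normFips code with
  | none => s
  | some n =>
    if n == "000000" then s
    else if PySem.Str.endswith n "000" then s
    else PySem.Set.add s (slc n 1 6)

theorem bAlertStep_eq (acc : Bool × PySem.Set String × PySem.Set String) (code : String) :
    bAlertStep acc code = (nwStep acc.1 code, aWideStep acc.2.1 code, cntStep acc.2.2 code) := by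
  simp only [bAlertStep, nwStep, aWideStep, cntStep]
  cases h : normFips code with
  | none => rfl
  | some n =>
      by_cases h0 : n = "000000"
      · subst h0; simp
      · by_cases he : PySem.Chars.endswith n.toList ['0', '0', '0'] = true
        · simp [h0, he]
        · simp [h0, he]

theorem bfold_eq (l : List String) (b : Bool) (st co : PySem.Set String) :
    l.foldl bAlertStep (b, st, co) = (l.foldl nwStep b, l.foldl aWideStep st, l.foldl cntStep co) := by
  induction l generalizing b st co with
  | nil => rfl
  | cons c t ih =>
      simp only [List.foldl_cons, bAlertStep_eq]
      exact ih _ _ _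

theorem nwfold_eq (l : List String) (b : Bool) :
    l.foldl nwStep b = (b || l.any (fun a => normFips a == some "000000")) := by
  induction l generalizing b with
  | nil => simp
  | cons c t ih =>
      simp only [List.foldl_cons, List.any_cons, nwStep]
      cases h : normFips c with
      | none => simp [ih, h]
      | some n =>
          by_cases h0 : n = "000000"
          · subst h0; simp [ih, h]
          · have hb : (n == "000000") = false := by simp [h0]
            simp [ih, h, hb]

theorem mem_aNorm (l : List String) (s : PySem.Set String) (x : String) :
    x ∈ l.foldl aNormStep s ↔ x ∈ s ∨ ∃ a ∈ l, normFips a = some x := by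
  induction l generalizing s with
  | nil => simp
  | cons c t ih =>
      simp only [List.foldl_cons, aNormStep]
      cases h : normFips c with
      | none => rw [ih]; simp [h]
      | some n =>
          rw [ih]
          simp [h, PySem.Set.mem_add]
          aesop

theorem mem_aWide (l : List String) (s : PySem.Set String) (x : String) :
    x ∈ l.foldl aWideStep s ↔
      x ∈ s ∨ ∃ a ∈ l, ∃ n, normFips a = some n ∧ n ≠ "000000" ∧
        PySem.Str.endswith n "000" = true ∧ slc n 1 3 = x := by
  induction l generalizing s with
  | nil => simp
  | cons c t ih =>
      simp only [List.foldl_cons, aWideStep]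
      cases h : normFips c with
      | none => rw [ih]; simp [h]
      | some n =>
          rw [ih]
          by_cases h0 : n = "000000"
          · subst h0; simp [h]
          · by_cases he : PySem.Chars.endswith n.toList ['0', '0', '0'] = true
            · simp [h, h0, he, PySem.Set.mem_add]
              aesop
            · simp [h, h0, he]

theorem mem_cnt (l : List String) (s : PySem.Set String) (x : String) :
    x ∈ l.foldl cntStep s ↔
      x ∈ s ∨ ∃ a ∈ l, ∃ n, normFips a = some n ∧ n ≠ "000000" ∧
        PySem.Str.endswith n "000" = false ∧ slc n 1 6 = x := by
  induction l generalizing s with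
  | nil => simp
  | cons c t ih =>
      simp only [List.foldl_cons, cntStep]
      cases h : normFips c with
      | none => rw [ih]; simp [h]
      | some n =>
          rw [ih]
          by_cases h0 : n = "000000"
          · subst h0; simp [h]
          · by_cases he : PySem.Chars.endswith n.toList ['0', '0', '0'] = true
            · simp [h, h0, he]
            · simp [h, h0, he, PySem.Set.mem_add]
              aesop

theorem mem_group (k : String → String) (l : List String) (d : PySem.Dict String (PySem.Set String))
    (key x : String) :
    x ∈ (l.foldl (aGroupStep k) d).getD key PySem.Set.empty ↔
      x ∈ d.getD key PySem.Set.empty ∨ ∃ c ∈ l, ∃ n, normFips c = some n ∧ k n = key ∧ x = c := by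
  induction l generalizing d with
  | nil => simp
  | cons c t ih =>
      simp only [List.foldl_cons, aGroupStep]
      cases h : normFips c with
      | none => rw [ih]; simp; aesop
      | some n =>
          rw [ih]
          dsimp only
          by_cases hk : k n = key
          · subst hk
            rw [PySem.Dict.getD_modify_self]
            simp [h, PySem.Set.mem_add]
            aesop
          · rw [PySem.Dict.getD_modify_of_ne _ _ _ (fun hEq => hk hEq.symm)]
            simp [h, hk]
            aesop

theorem mem_pairs (l : List String) (acc : List (String × String)) (p : String × String) :
    p ∈ l.foldl bPairsStep acc ↔ p ∈ acc ∨ ∃ c ∈ l, normFips c = some p.1 ∧ p.2 = c := by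
  induction l generalizing acc with
  | nil => simp
  | cons c t ih =>
      simp only [List.foldl_cons, bPairsStep]
      cases h : normFips c with
      | none => rw [ih]; simp; aesop
      | some n =>
          rw [ih]
          simp [h, Prod.ext_iff]
          aesop

-- generic membership / nodup of the three match-accumulating folds
theorem mem_fold_update (l : List String) (g : String → PySem.Set String) (s : PySem.Set String)
    (x : String) :
    x ∈ l.foldl (fun m st => PySem.Set.update m (g st)) s ↔ x ∈ s ∨ ∃ a ∈ l, x ∈ g a := by
  induction l generalizing s with
  | nil => simp
  | cons c t ih => simp [ih, PySem.Set.mem_update]; tauto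

theorem mem_fold_update_if (l : List String) (c : String → Bool) (g : String → PySem.Set String)
    (s : PySem.Set String) (x : String) :
    x ∈ l.foldl (fun m a => if c a then m else PySem.Set.update m (g a)) s ↔
      x ∈ s ∨ ∃ a ∈ l, c a = false ∧ x ∈ g a := by
  induction l generalizing s with
  | nil => simp
  | cons a t ih =>
      simp only [List.foldl_cons]
      by_cases h : c a = true
      · rw [if_pos h, ih]; simp [h]
      · rw [if_neg h, ih]
        simp [PySem.Set.mem_update, Bool.eq_false_iff.mpr h]
        tauto

theorem mem_fold_add_if (ps : List (String × String)) (c : String × String → Bool)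
    (s : PySem.Set String) (x : String) :
    x ∈ ps.foldl (fun out p => if c p then PySem.Set.add out p.2 else out) s ↔
      x ∈ s ∨ ∃ p ∈ ps, c p = true ∧ x = p.2 := by
  induction ps generalizing s with
  | nil => simp
  | cons p t ih =>
      simp only [List.foldl_cons]
      by_cases h : c p = true
      · rw [if_pos h, ih]; simp [PySem.Set.mem_add, h]; tauto
      · rw [if_neg h, ih]; simp [h]

theorem nodup_fold_update (l : List String) (g : String → PySem.Set String) (s : PySem.Set String)
    (hs : s.Nodup) : (l.foldl (fun m st => PySem.Set.update m (g st)) s).Nodup := by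
  induction l generalizing s with
  | nil => exact hs
  | cons c t ih => exact ih _ (PySem.Set.nodup_update _ _ hs)

theorem nodup_fold_update_if (l : List String) (c : String → Bool) (g : String → PySem.Set String)
    (s : PySem.Set String) (hs : s.Nodup) :
    (l.foldl (fun m a => if c a then m else PySem.Set.update m (g a)) s).Nodup := by
  induction l generalizing s with
  | nil => exact hs
  | cons a t ih =>
      simp only [List.foldl_cons]
      by_cases h : c a = true
      · rw [if_pos h]; exact ih _ hs
      · rw [if_neg h]; exact ih _ (PySem.Set.nodup_update _ _ hs)

theorem nodup_fold_add_if (ps : List (String × String)) (c : String × String → Bool)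
    (s : PySem.Set String) (hs : s.Nodup) :
    (ps.foldl (fun out p => if c p then PySem.Set.add out p.2 else out) s).Nodup := by
  induction ps generalizing s with
  | nil => exact hs
  | cons p t ih =>
      simp only [List.foldl_cons]
      by_cases h : c p = true
      · rw [if_pos h]; exact ih _ (PySem.Set.nodup_add _ _ hs)
      · rw [if_neg h]; exact ih _ hs

-- ===== VERDICT (by name: the statement is the Claim_ definition above) =====
theorem determine_fips_matches_spec : Claim_equal_determine_fips_matches := by
  intro alerts configs _
  show determine_fips_matches alerts configs = determine_fips_matches_alt alerts configs
  simp only [determine_fips_matches, determine_fips_matches_alt]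
  rw [bfold_eq]
  by_cases hnw : (alerts.any fun a => normFips a == some "000000") = true
  · -- nationwide on both sides
    have hA : PySem.Set.contains (alerts.foldl aNormStep PySem.Set.empty) "000000" = true := by
      rw [PySem.Set.contains_iff, mem_aNorm]
      simp only [List.any_eq_true, beq_iff_eq] at hnw
      exact Or.inr hnw
    have hB : (alerts.foldl nwStep false) = true := by rw [nwfold_eq, Bool.false_or]; exact hnw
    rw [hA, hB, if_pos rfl, if_pos rfl]
    rfl
  · have hB : (alerts.foldl nwStep false) = false := by
      rw [nwfold_eq, Bool.false_or]; exact Bool.eq_false_iff.mpr hnw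
    have hA : PySem.Set.contains (alerts.foldl aNormStep PySem.Set.empty) "000000" = false := by
      rw [Bool.eq_false_iff]
      intro hc
      rw [PySem.Set.contains_iff, mem_aNorm] at hc
      rcases hc with hc | ⟨a, ha, hfa⟩
      · simp [PySem.Set.empty] at hc
      · exact hnw (by simp only [List.any_eq_true, beq_iff_eq]; exact ⟨a, ha, hfa⟩)
    rw [hA, hB, if_neg (by simp), if_neg (by simp)]
    -- both sides sort a duplicate-free accumulation; show the two hold the same elements
    refine PySem.List.sorted_eq_sorted_of_perm _ _ _ (fun a b hab => hab)
      ((List.perm_ext_iff_of_nodup ?_ ?_).mpr ?_)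
    · exact nodup_fold_update_if _ _ _ _ (nodup_fold_update _ _ _ List.nodup_nil)
    · exact nodup_fold_add_if _ _ _ List.nodup_nil
    · intro x
      rw [mem_fold_update_if _ _ _ _ x, mem_fold_update _ _ _ x, mem_fold_add_if _ _ _ x]
      constructor
      · rintro ((h0 | ⟨st, hst, hx⟩) | ⟨a, ha, hc, hx⟩)
        · cases h0
        · -- statewide match in A
          rw [mem_aWide] at hst
          rcases hst with hst | ⟨aa, haa, m, hm, hmne, hmend, hmsl⟩
          · cases hst
          rw [mem_group] at hx
          rcases hx with hx | ⟨cc, hcc, n, hn, hk, rfl⟩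
          · cases hx
          refine Or.inr ⟨(n, x), (mem_pairs _ _ _).mpr (Or.inr ⟨x, hcc, hn, rfl⟩), ?_, rfl⟩
          refine Bool.or_eq_true_iff.mpr (Or.inl ((PySem.Set.contains_iff _ _).mpr ?_))
          rw [mem_aWide]
          exact Or.inr ⟨aa, haa, m, hm, hmne, hmend, hmsl.trans hk.symm⟩
        · -- county match in A
          rw [mem_aNorm] at ha
          rcases ha with ha | ⟨aa, haa, hfa⟩
          · cases ha
          have hc' := Bool.or_eq_false_iff.mp hc
          have hane : a ≠ "000000" := by
            intro hEq; rw [hEq] at hc'; simp at hc'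
          have haend : PySem.Str.endswith a "000" = false := hc'.2
          rw [mem_group] at hx
          rcases hx with hx | ⟨cc, hcc, n, hn, hk, rfl⟩
          · cases hx
          refine Or.inr ⟨(n, x), (mem_pairs _ _ _).mpr (Or.inr ⟨x, hcc, hn, rfl⟩), ?_, rfl⟩
          refine Bool.or_eq_true_iff.mpr (Or.inr ((PySem.Set.contains_iff _ _).mpr ?_))
          rw [mem_cnt]
          exact Or.inr ⟨aa, haa, a, hfa, hane, haend, hk.symm⟩
      · rintro (h | ⟨p, hp, hcond, hx⟩)
        · cases h
        subst hx
        obtain ⟨cc, hcc, hn, hpc⟩ := ((mem_pairs _ _ _).mp hp).resolve_left (by simp)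
        rcases Bool.or_eq_true_iff.mp hcond with hst | hco
        · -- via a statewide alert
          have := (PySem.Set.contains_iff _ _).mp hst
          rw [mem_aWide] at this
          rcases this with h | ⟨aa, haa, m, hm, hmne, hmend, hmsl⟩
          · cases h
          refine Or.inl (Or.inr ⟨slc p.1 1 3, ?_, ?_⟩)
          · rw [mem_aWide]
            exact Or.inr ⟨aa, haa, m, hm, hmne, hmend, hmsl⟩
          · rw [mem_group]
            exact Or.inr ⟨cc, hcc, p.1, hn, rfl, hpc⟩
        · -- via a county alert
          have := (PySem.Set.contains_iff _ _).mp hco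
          rw [mem_cnt] at this
          rcases this with h | ⟨aa, haa, m, hm, hmne, hmend, hmsl⟩
          · cases h
          refine Or.inr ⟨m, ?_, ?_, ?_⟩
          · rw [mem_aNorm]; exact Or.inr ⟨aa, haa, hm⟩
          · refine Bool.or_eq_false_iff.mpr ⟨beq_eq_false_iff_ne.mpr hmne, hmend⟩
          · rw [mem_group]
            exact Or.inr ⟨cc, hcc, p.1, hn, hmsl.symm, hpc⟩
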